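-- pv_equiv track=rewrite | github.com/RianAndrade/hacka_ev26 | src/sinan/api/views/sinan_upload_csv.py | _extract_epi_week
-- ===== SOURCE A (Python) =====
-- from typing import Any, Optional
--
-- def _clean_str(value: Any) -> Optional[str]:
--     """
--     - None/NaN/"" -> None
--     - tira espaços nas pontas
--     - mantém espaços do meio
--     """
--     if value is None:
--         return None
--
--     s = str(value)
--     s = s.strip()
--
--     if not s:
--         return None
--
--     lowered = s.lower()
--     if lowered in ("nan", "none", "null"):
--         return None
--
--     return s
--
-- def _extract_epi_week(value: Any) -> Optional[int]:
--
--     s = _clean_str(value)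
--     if s is None:
--         return None
--
--     digits = "".join(ch for ch in s if ch.isdigit())
--     if len(digits) < 2:
--         return None
--
--     week = int(digits[-2:])
--     if 1 <= week <= 53:
--         return week
--     return None
-- ===== SOURCE B (Python) =====
-- from typing import Any, Optional
--
-- def _clean_str(value: Any) -> Optional[str]:
--     if value is None:
--         return None
--     s = str(value)
--     s = s.strip()
--     if not s:
--         return None
--     lowered = s.lower()
--     if lowered in ("nan", "none", "null"):
--         return None
--     return s
--
-- def _extract_epi_week(value: Any) -> Optional[int]:
--     s = _clean_str(value)
--     if s is None:
--         return None
--     ones = None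
--     tens = None
--     for ch in reversed(s):
--         if ch.isdigit():
--             if ones is None:
--                 ones = ch
--             else:
--                 tens = ch
--                 break
--     if tens is None:
--         return None
--     week = (ord(tens) - 48) * 10 + (ord(ones) - 48)
--     if 1 <= week <= 53:
--         return week
--     return None
-- ===== Notes on version B (the rewrite author's own statement) =====
-- stated objective: alternative
-- what changed: Instead of collecting all digits forward, joining them and slicing the last two, B scans the cleaned string in reverse, stops as soon as it has seen two digits, and assembles the week arithmetically from their character codes.
import Mathlib
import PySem

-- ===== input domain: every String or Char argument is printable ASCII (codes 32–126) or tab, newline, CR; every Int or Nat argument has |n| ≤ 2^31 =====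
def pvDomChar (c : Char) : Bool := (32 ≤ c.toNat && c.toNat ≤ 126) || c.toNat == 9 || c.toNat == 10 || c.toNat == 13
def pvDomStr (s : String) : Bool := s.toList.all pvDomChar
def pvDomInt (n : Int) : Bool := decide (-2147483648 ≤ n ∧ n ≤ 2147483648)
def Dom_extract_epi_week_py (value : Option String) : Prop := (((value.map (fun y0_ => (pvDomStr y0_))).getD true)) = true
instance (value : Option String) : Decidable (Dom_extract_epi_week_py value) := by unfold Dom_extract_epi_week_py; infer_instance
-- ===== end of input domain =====

-- B replaces A's full forward digit-collection + slice by a reverse scan that stops after the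
-- last two digits and assembles the week arithmetically (objective: alternative decomposition).

-- ===== PORT A =====
-- shared helper: _clean_str (Source B reuses it unchanged)
def clean_str_py (value : Option String) : Option String :=
  match value with
  | none => none
  | some v =>
    let s := PySem.Str.strip v
    if s = "" then none
    else
      let lowered := PySem.Str.lower s
      if lowered = "nan" ∨ lowered = "none" ∨ lowered = "null" then none
      else some s

def extract_epi_week_py (value : Option String) : Option Int :=
  match clean_str_py value with
  | none => none
  | some s =>
    let digits := s.toList.filter PySem.Chars.isdigit
    if digits.length < 2 then none
    else
      match PySem.Int.ofChars? (PySem.List.slice digits (some (-2)) none) with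
      | none => none          -- int() raising: unreachable, digits are ASCII '0'-'9'
      | some week => if 1 ≤ week ∧ week ≤ 53 then some week else none

-- ===== PORT B =====
-- the reverse scan of Source B: carry the ones digit, stop as soon as the tens digit is found
def findTwoDigits : List Char → Option Char → Option (Char × Char)
  | [], _ => none
  | c :: rest, ones? =>
    if PySem.Chars.isdigit c then
      match ones? with
      | none => findTwoDigits rest (some c)
      | some o => some (c, o)
    else findTwoDigits rest ones?

def extract_epi_week_py_alt (value : Option String) : Option Int :=
  match clean_str_py value with
  | none => none
  | some s =>
    match findTwoDigits s.toList.reverse none with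
    | none => none
    | some (t, o) =>
      let week : Int := ((t.toNat : Int) - 48) * 10 + ((o.toNat : Int) - 48)
      if 1 ≤ week ∧ week ≤ 53 then some week else none

-- ===== PRECONDITION & SPEC =====
def Spec_extract_epi_week_py (value : Option String) (out : Option Int) : Prop := out = extract_epi_week_py_alt value
instance (value : Option String) (out : Option Int) : Decidable (Spec_extract_epi_week_py value out) := by unfold Spec_extract_epi_week_py; infer_instance

-- ===== CLAIM (what is proved, stated in full; the proofs are below) =====
def Claim_equal_extract_epi_week_py : Prop := ∀ (value : Option String), Dom_extract_epi_week_py value → Spec_extract_epi_week_py value (extract_epi_week_py value)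

-- ===== LEMMAS AND PROOFS =====

theorem isdigit_mem (c : Char) (h : PySem.Chars.isdigit c = true) :
    c ∈ ['0','1','2','3','4','5','6','7','8','9'] := by
  simp only [PySem.Chars.isdigit, Bool.and_eq_true, decide_eq_true_eq, Char.le_def] at h
  have h1 : 48 ≤ c.toNat := h.1
  have h2 : c.toNat ≤ 57 := h.2
  have hc : c = Char.ofNat c.toNat := (Char.ofNat_toNat c).symm
  interval_cases hn : c.toNat <;> rw [hc] <;> decide

theorem ofChars?_two_digits (t o : Char) (ht : PySem.Chars.isdigit t = true)
    (ho : PySem.Chars.isdigit o = true) :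
    PySem.Int.ofChars? [t, o] = some (((t.toNat : Int) - 48) * 10 + ((o.toNat : Int) - 48)) := by
  have hmt := isdigit_mem t ht
  have hmo := isdigit_mem o ho
  fin_cases hmt <;> fin_cases hmo <;> decide

theorem findTwoDigits_some (l : List Char) (o : Char) :
    findTwoDigits l (some o) =
      match l.filter PySem.Chars.isdigit with
      | [] => none
      | t :: _ => some (t, o) := by
  induction l with
  | nil => rfl
  | cons c rest ih =>
    by_cases hd : PySem.Chars.isdigit c = true <;>
      simp [findTwoDigits, hd, ih]

theorem findTwoDigits_none (l : List Char) :
    findTwoDigits l none =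
      match l.filter PySem.Chars.isdigit with
      | o :: t :: _ => some (t, o)
      | _ => none := by
  induction l with
  | nil => rfl
  | cons c rest ih =>
    by_cases hd : PySem.Chars.isdigit c = true
    · simp only [findTwoDigits, hd, if_pos, List.filter_cons_of_pos hd,
        findTwoDigits_some]
      cases rest.filter PySem.Chars.isdigit <;> rfl
    · simp only [findTwoDigits, hd, if_neg, Bool.false_eq_true, not_false_iff,
        List.filter_cons_of_neg (by simpa using hd), ih]

-- the tails agree on any character list
theorem tails_agree (l : List Char) :
    (let digits := l.filter PySem.Chars.isdigit;
     if digits.length < 2 then none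
     else
       match PySem.Int.ofChars? (PySem.List.slice digits (some (-2)) none) with
       | none => none
       | some week => if 1 ≤ week ∧ week ≤ 53 then some week else none)
    = (match findTwoDigits l.reverse none with
       | none => none
       | some (t, o) =>
         let week : Int := ((t.toNat : Int) - 48) * 10 + ((o.toNat : Int) - 48)
         if 1 ≤ week ∧ week ≤ 53 then some week else none) := by
  rw [findTwoDigits_none, List.filter_reverse]
  rcases hd : (l.filter PySem.Chars.isdigit).reverse with _ | ⟨o, _ | ⟨t, rest⟩⟩
  · have : l.filter PySem.Chars.isdigit = [] := by
      simpa using congrArg List.reverse hd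
    simp [this]
  · have : l.filter PySem.Chars.isdigit = [o] := by
      simpa using congrArg List.reverse hd
    simp [this]
  · have hds : l.filter PySem.Chars.isdigit = rest.reverse ++ [t, o] := by
      simpa using congrArg List.reverse hd
    have hlen : (l.filter PySem.Chars.isdigit).length = rest.length + 2 := by
      simp [hds]
    have hslice : PySem.List.slice (l.filter PySem.Chars.isdigit) (some (-2)) none = [t, o] := by
      rw [PySem.List.slice_from_neg_ofNat _ 2 (by omega), hlen, hds]
      have : rest.length + 2 - 2 = rest.reverse.length := by simp
      rw [this, List.drop_left]
    have ht : PySem.Chars.isdigit t = true := by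
      have : t ∈ l.filter PySem.Chars.isdigit := by simp [hds]
      exact (List.mem_filter.mp this).2
    have ho : PySem.Chars.isdigit o = true := by
      have : o ∈ l.filter PySem.Chars.isdigit := by simp [hds]
      exact (List.mem_filter.mp this).2
    simp only [hlen, hslice, ofChars?_two_digits t o ht ho]
    norm_num
    omega

-- ===== VERDICT (by name: the statement is the Claim_ definition above) =====
theorem extract_epi_week_py_spec : Claim_equal_extract_epi_week_py := by
  intro value _
  unfold Spec_extract_epi_week_py extract_epi_week_py extract_epi_week_py_alt
  cases clean_str_py value with
  | none => rfl
  | some s => exact tails_agree s.toList
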